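-- pv_equiv track=rewrite | github.com/pair0/Programmers | 연습문제/LV0/컨트롤 제트.py | solution
-- ===== SOURCE A (Python) =====
-- def solution(s):
--     answer = 0
--     list_s = s.split()
--
--     for i in range(len(list_s)):
--         if list_s[i] == "Z":
--             answer -= int(list_s[i-1])
--         else:
--             answer += int(list_s[i])
--
--     return answer
-- ===== SOURCE B (Python) =====
-- def solution(s):
--     toks = s.split()
--     succ = toks[1:] + toks[:1]
--     return sum(int(t) for t, u in zip(toks, succ) if t != "Z" and u != "Z")
-- ===== Notes on version B (the rewrite author's own statement) =====
-- stated objective: alternative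
-- what changed: B replaces A's signed accumulator (add each token, subtract the predecessor of each 'Z') by a cancellation argument: a token immediately followed by 'Z' is added and then subtracted, so B zips each token with its cyclic successor and sums only tokens where neither the token nor its successor is 'Z', performing no subtraction at all.
import Mathlib
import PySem

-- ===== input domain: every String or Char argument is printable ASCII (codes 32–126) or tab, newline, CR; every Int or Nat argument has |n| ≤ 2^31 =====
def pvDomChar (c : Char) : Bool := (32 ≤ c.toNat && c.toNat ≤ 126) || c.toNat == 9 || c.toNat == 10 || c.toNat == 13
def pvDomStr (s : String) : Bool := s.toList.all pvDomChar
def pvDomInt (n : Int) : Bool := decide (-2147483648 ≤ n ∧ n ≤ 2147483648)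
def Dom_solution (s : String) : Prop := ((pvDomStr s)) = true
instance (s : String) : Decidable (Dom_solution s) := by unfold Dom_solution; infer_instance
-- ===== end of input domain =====

-- B replaces A's signed accumulator by a cancellation sum over tokens zipped with their
-- cyclic successors (alternative algorithm, same cost).

-- ===== PORT A =====
def solution (s : String) : Int :=
  let list_s := PySem.Str.split₀ s
  (PySem.List.pyRange 0 (list_s.length : Int) 1).foldl
    (fun answer i =>
      if PySem.List.pyGetD list_s i "" = "Z" then
        answer - (PySem.Int.ofStr? (PySem.List.pyGetD list_s (i - 1) "")).getD 0
      else
        answer + (PySem.Int.ofStr? (PySem.List.pyGetD list_s i "")).getD 0)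
    0

-- ===== PORT B =====
def solution_alt (s : String) : Int :=
  let toks := PySem.Str.split₀ s
  let succ := toks.drop 1 ++ toks.take 1
  (((toks.zip succ).filter (fun p => decide (p.1 ≠ "Z" ∧ p.2 ≠ "Z"))).map
      (fun p => (PySem.Int.ofStr? p.1).getD 0)).sum

-- ===== PRECONDITION & SPEC =====
-- Pre_ excludes only inputs on which A raises ValueError: a non-"Z" token that is not an
-- int literal, or a "Z" whose (wraparound) predecessor token is not an int literal.
def Pre_solution (s : String) : Prop :=
  ∀ p ∈ PySem.List.enumerate (PySem.Str.split₀ s) 0,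
    (PySem.Int.ofStr?
      (if p.2 = "Z" then PySem.List.pyGetD (PySem.Str.split₀ s) (p.1 - 1) "" else p.2)).isSome
instance (s : String) : Decidable (Pre_solution s) := by unfold Pre_solution; infer_instance
def pvWitness_solution : String := "1 2 Z 3"
def Spec_solution (s : String) (out : Int) : Prop := out = solution_alt s
instance (s : String) (out : Int) : Decidable (Spec_solution s out) := by unfold Spec_solution; infer_instance

-- ===== CLAIM (what is proved, stated in full; the proofs are below) =====
def Claim_equal_solution : Prop := ∀ (s : String), Dom_solution s → Pre_solution s → Spec_solution s (solution s)

-- ===== LEMMAS AND PROOFS =====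

-- token value, as both ports compute it
def pvVal (t : String) : Int := (PySem.Int.ofStr? t).getD 0

theorem pvVal_eq (t : String) : pvVal t = (PySem.Int.ofStr? t).getD 0 := rfl

theorem pvVal_Z : pvVal "Z" = 0 := by decide

-- A's tail loop (indices ≥ 1), structurally: prev token tracked explicitly
def pvF (p : String) (ys : List String) : Int :=
  match ys with
  | [] => 0
  | y :: ys' => (if y = "Z" then -(pvVal p) else pvVal y) + pvF y ys'

-- B's sum, structurally: current token, remaining tokens, wrap-around head
def pvH (p : String) (ys : List String) (h : String) : Int :=
  match ys with
  | [] => if p ≠ "Z" ∧ h ≠ "Z" then pvVal p else 0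
  | y :: ys' => (if p ≠ "Z" ∧ y ≠ "Z" then pvVal p else 0) + pvH y ys' h

-- A's loop as a sum of signed terms.
theorem foldl_signed (l : List Int) (c : Int → Prop) [DecidablePred c] (f g : Int → Int) (a : Int) :
    l.foldl (fun acc i => if c i then acc - f i else acc + g i) a
      = a + (l.map (fun i => if c i then -(f i) else g i)).sum := by
  induction l generalizing a with
  | nil => simp
  | cons x xs ih =>
    simp only [List.foldl_cons, List.map_cons, List.sum_cons, ih]
    by_cases h : c x <;> simp [h] <;> ring


-- B's sum computed structurally over (p :: ys) zipped with (ys ++ [h]).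
theorem B_char (ys : List String) : ∀ (p h : String),
    ((((p :: ys).zip (ys ++ [h])).filter (fun q => decide (q.1 ≠ "Z" ∧ q.2 ≠ "Z"))).map
        (fun q => pvVal q.1)).sum = pvH p ys h := by
  induction ys with
  | nil =>
    intro p h
    by_cases hp : p = "Z" <;> by_cases hh : h = "Z" <;>
      simp [pvH, hp, hh, List.filter, pvVal]
  | cons y ys' ih =>
    intro p h
    simp only [List.cons_append, List.zip_cons_cons]
    by_cases hc : p ≠ "Z" ∧ y ≠ "Z"
    · rw [List.filter_cons_of_pos (by simpa using hc), List.map_cons, List.sum_cons, ih y h]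
      simp [pvH, hc]
    · rw [List.filter_cons_of_neg (by simpa using hc), ih y h]
      simp [pvH, hc]

-- A's tail loop (indices k … n-1, k ≥ 1) as the structural recursion pvF.
theorem rangeSum (L : List String) : ∀ (m k : Nat), 1 ≤ k → k + m = L.length →
    ((PySem.List.pyRange (k : Int) (L.length : Int) 1).map
        (fun i => if PySem.List.pyGetD L i "" = "Z" then
            -(pvVal (PySem.List.pyGetD L (i - 1) ""))
          else pvVal (PySem.List.pyGetD L i ""))).sum
      = pvF (L.getD (k - 1) "") (L.drop k) := by
  intro m
  induction m with
  | zero =>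
    intro k hk hlen
    rw [PySem.List.pyRange_one_eq_nil (by omega)]
    have : L.drop k = [] := List.drop_eq_nil_of_le (by omega)
    simp [this, pvF]
  | succ m ih =>
    intro k hk hlen
    have hkl : k < L.length := by omega
    rw [PySem.List.pyRange_one_cons (by exact_mod_cast hkl)]
    simp only [List.map_cons, List.sum_cons]
    have hcast : (k : Int) + 1 = ((k + 1 : Nat) : Int) := by push_cast; ring
    rw [hcast, ih (k + 1) (by omega) (by omega)]
    have h1 : PySem.List.pyGetD L (k : Int) "" = L[k] := by
      rw [PySem.List.pyGetD_natCast, List.getD_eq_getElem L "" hkl]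
    have h2 : (k : Int) - 1 = ((k - 1 : Nat) : Int) := by omega
    have h3 : PySem.List.pyGetD L ((k : Int) - 1) "" = L.getD (k - 1) "" := by
      rw [h2, PySem.List.pyGetD_natCast]
    have h4 : L.drop k = L[k] :: L.drop (k + 1) := (List.getElem_cons_drop hkl).symm
    have h5 : L.getD (k + 1 - 1) "" = L[k] := by
      simp only [Nat.add_sub_cancel]
      exact List.getD_eq_getElem L "" hkl
    rw [h1, h3, h4, h5, pvF]

-- getLast of a cons, with the head as default.
theorem getLast_cons_eq_getLastD (xs : List String) : ∀ (x : String),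
    (x :: xs).getLast (by simp) = xs.getLastD x := by
  induction xs with
  | nil => intro x; simp
  | cons y ys ih =>
    intro x
    rw [List.getLastD_cons, List.getLast_cons (by simp)]
    exact ih y

-- The cancellation identity: pvH in terms of pvF.
theorem main_lemma (ys : List String) : ∀ (p h : String),
    pvH p ys h = (if p = "Z" then 0 else pvVal p) + pvF p ys
      - (if h = "Z" then pvVal (ys.getLastD p) else 0) := by
  induction ys with
  | nil =>
    intro p h
    by_cases hp : p = "Z" <;> by_cases hh : h = "Z" <;>
      simp [pvH, pvF, hp, hh, pvVal_Z]
  | cons y ys' ih =>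
    intro p h
    simp only [pvH, pvF, ih y h, List.getLastD_cons]
    by_cases hp : p = "Z" <;> by_cases hy : y = "Z" <;>
      simp [hp, hy, pvVal_Z] <;> try ring

-- ===== VERDICT (by name: the statement is the Claim_ definition above) =====
theorem solution_spec : Claim_equal_solution := by
  intro s _ _
  unfold Spec_solution solution solution_alt
  simp only []
  generalize PySem.Str.split₀ s = L
  cases L with
  | nil => decide
  | cons x xs =>
    rw [foldl_signed _ (fun i => PySem.List.pyGetD (x :: xs) i "" = "Z")
        (fun i => (PySem.Int.ofStr? (PySem.List.pyGetD (x :: xs) (i - 1) "")).getD 0)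
        (fun i => (PySem.Int.ofStr? (PySem.List.pyGetD (x :: xs) i "")).getD 0)]
    simp only [← pvVal_eq]
    have hlen : (0 : Int) < ((x :: xs).length : Int) := by
      simp
    rw [PySem.List.pyRange_one_cons hlen]
    simp only [List.map_cons, List.sum_cons, zero_add]
    rw [show (PySem.List.pyRange 1 ((x :: xs).length : Int) 1)
          = PySem.List.pyRange ((1 : Nat) : Int) ((x :: xs).length : Int) 1 from rfl,
        rangeSum (x :: xs) xs.length 1 (by omega) (by rw [List.length_cons]; omega)]
    simp only [Nat.sub_self, List.drop_succ_cons, List.drop_zero, List.getD_cons_zero]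
    have hhead : PySem.List.pyGetD (x :: xs) ((0 : Int) - 1) ""
        = xs.getLastD x := by
      rw [show ((0 : Int) - 1) = (-1 : Int) by norm_num]
      exact (PySem.List.pyGetD_neg_one _ _ (List.cons_ne_nil x xs)).trans
        (getLast_cons_eq_getLastD xs x)
    have hzero : PySem.List.pyGetD (x :: xs) (0 : Int) "" = x :=
      PySem.List.pyGetD_zero_cons x xs ""
    rw [hhead, hzero]
    simp only [List.take_succ_cons, List.take_zero]
    rw [B_char xs x x, main_lemma xs x x]
    by_cases hx : x = "Z" <;> simp [hx] <;> try ring
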